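-- pv_equiv track=rewrite | github.com/237rahul/competative-programming | WEEK 2/week2_Exam/prob2.py | room_keys
-- ===== SOURCE A (Python) =====
-- def room_keys(lis1):
-- 	lis2=[]
-- 	for i in range(1,len(lis1)):
-- 		lis2.append(i)
-- 	for i in range(len(lis1)):
-- 		for j in lis1[i]:
-- 			if j in lis2 and j!=i:
-- 				lis2.remove(j)
-- 	return len(lis2)==0
-- ===== SOURCE B (Python) =====
-- def room_keys(lis1):
--     n = len(lis1)
--     return all(
--         any(i != k and k in room for i, room in enumerate(lis1))
--         for k in range(1, n)
--     )
-- ===== Notes on version B (the rewrite author's own statement) =====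
-- stated objective: simpler
-- what changed: Replaces the remaining-keys list that is mutated by repeated list.remove during a scan of the rooms with a direct all/any check: for each required key 1..n-1, scan the rooms for an occurrence in some other room.
import Mathlib
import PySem

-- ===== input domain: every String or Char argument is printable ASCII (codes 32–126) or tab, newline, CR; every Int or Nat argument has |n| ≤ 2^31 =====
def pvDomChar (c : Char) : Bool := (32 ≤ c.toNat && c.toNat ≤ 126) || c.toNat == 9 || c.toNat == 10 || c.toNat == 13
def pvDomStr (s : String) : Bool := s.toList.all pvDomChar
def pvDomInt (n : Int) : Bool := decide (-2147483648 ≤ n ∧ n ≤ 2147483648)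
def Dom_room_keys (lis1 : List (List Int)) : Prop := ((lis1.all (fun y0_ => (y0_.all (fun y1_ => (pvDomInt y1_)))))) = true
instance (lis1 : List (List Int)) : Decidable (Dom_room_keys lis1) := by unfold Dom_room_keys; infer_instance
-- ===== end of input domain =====

-- B replaces A's mutated remaining-keys list (scan rooms, remove found keys) by a direct
-- all/any check per required key; objective: simpler, same exact result.

-- ===== PORT A =====
-- literal port of A: build lis2 = [1..n-1], scan rooms with index i, remove each j found
-- with j != i; 'lis2.remove(j)' is guarded by 'j in lis2', so remove? is always some and
-- '.getD l2' is never the fallback.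
def room_keys (lis1 : List (List Int)) : Bool :=
  ((PySem.List.enumerate lis1).foldl
      (fun l2 p =>
        p.2.foldl
          (fun l2 j =>
            if l2.contains j && j != p.1 then (PySem.List.remove? l2 j).getD l2 else l2)
          l2)
      ((PySem.List.pyRange 1 lis1.length 1).foldl (fun a i => a ++ [i]) [])).length == 0

-- ===== PORT B =====
def room_keys_alt (lis1 : List (List Int)) : Bool :=
  (PySem.List.pyRange 1 lis1.length 1).all (fun k =>
    (PySem.List.enumerate lis1).any (fun p => p.1 != k && p.2.contains k))

-- ===== PRECONDITION & SPEC =====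
def Spec_room_keys (lis1 : List (List Int)) (out : Bool) : Prop := out = room_keys_alt lis1
instance (lis1 : List (List Int)) (out : Bool) : Decidable (Spec_room_keys lis1 out) := by unfold Spec_room_keys; infer_instance

-- ===== CLAIM (what is proved, stated in full; the proofs are below) =====
def Claim_equal_room_keys : Prop := ∀ (lis1 : List (List Int)), Dom_room_keys lis1 → Spec_room_keys lis1 (room_keys lis1)

-- ===== LEMMAS AND PROOFS =====

-- the inner loop over one room's keys filters out of l2 every key found in the room (other than i)
theorem pv_inner (i : Int) (room : List Int) :
    ∀ (l2 : List Int), l2.Nodup →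
      room.foldl
        (fun l2 j =>
          if l2.contains j && j != i then (PySem.List.remove? l2 j).getD l2 else l2) l2
      = l2.filter (fun k => !(room.contains k && k != i)) := by
  induction room with
  | nil => intro l2 _; simp
  | cons j rest ih =>
    intro l2 hnd
    simp only [List.foldl_cons]
    split_ifs with hm
    · have hj : j ∈ l2 ∧ j ≠ i := by simpa [bne_iff_ne, List.contains_iff_mem] using hm
      rw [PySem.List.remove?_eq_some_erase l2 j hj.1, Option.getD_some,
        ih _ (hnd.erase j), List.Nodup.erase_eq_filter hnd,
        List.filter_filter]
      apply List.filter_congr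
      intro k _
      by_cases hk : k = j
      · subst hk
        simp [bne_iff_ne, hj.2]
      · simp [bne_iff_ne, hk]
    · have hj : j ∈ l2 → j = i := by
        intro hmem
        by_contra hne
        exact hm (by simp [bne_iff_ne, hmem, hne])
      rw [ih _ hnd]
      apply List.filter_congr
      intro k hk
      by_cases hkj : k = j
      · subst hkj
        simp [hj hk]
      · simp [hkj]

-- the outer loop over all (index, room) pairs filters out every covered key
theorem pv_outer (pairs : List (Int × List Int)) :
    ∀ (l2 : List Int), l2.Nodup →
      pairs.foldl
        (fun l2 p =>
          p.2.foldl
            (fun l2 j =>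
              if l2.contains j && j != p.1 then (PySem.List.remove? l2 j).getD l2 else l2)
            l2) l2
      = l2.filter (fun k => !(pairs.any (fun p => p.2.contains k && k != p.1))) := by
  induction pairs with
  | nil => intro l2 _; simp
  | cons p rest ih =>
    intro l2 hnd
    simp only [List.foldl_cons]
    rw [pv_inner p.1 p.2 l2 hnd, ih _ (hnd.filter _), List.filter_filter]
    apply List.filter_congr
    intro k _
    simp [List.any_cons, Bool.and_comm]

-- length-zero test on the kept keys is the all-covered test
theorem pv_len_filter (q : Int → Bool) (l : List Int) :
    ((l.filter (fun k => !q k)).length == 0) = l.all q := by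
  induction l with
  | nil => simp
  | cons x xs ih => by_cases hq : q x <;> simp [hq, ih]

-- ===== VERDICT (by name: the statement is the Claim_ definition above) =====
theorem room_keys_spec : Claim_equal_room_keys := by
  intro lis1 _
  unfold Spec_room_keys room_keys room_keys_alt
  rw [PySem.List.foldl_append_singleton_eq_self, List.nil_append,
    pv_outer _ _ (PySem.List.nodup_pyRange_one _ _), pv_len_filter]
  congr 1
  funext k
  congr 1
  funext p
  rw [Bool.and_comm, bne_comm]
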